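-- pv_equiv track=rewrite | github.com/jso8910/advent_of_code | 2017/day_9/program.py | part_two
-- ===== SOURCE A (Python) =====
-- def part_two(stream):
--     amount_garbage = 0
--     garbage = False
--     canceled_next = False
--     for char in stream:
--         if char == "<" and not garbage:
--             garbage = True
--         elif char == ">" and garbage and not canceled_next:
--             garbage = False
--         elif char == "!" and garbage and not canceled_next:
--             canceled_next = True
--         elif canceled_next:
--             canceled_next = False
--         elif garbage:
--             amount_garbage += 1
--
--     return amount_garbage
-- ===== SOURCE B (Python) =====
-- def part_two(stream):
--     count = 0
--     i = 0
--     n = len(stream)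
--     while i < n:
--         if stream[i] != '<':
--             i += 1
--             continue
--         i += 1
--         while i < n and stream[i] != '>':
--             if stream[i] == '!':
--                 i += 2
--             else:
--                 count += 1
--                 i += 1
--         i += 1
--     return count
-- ===== Notes on version B (the rewrite author's own statement) =====
-- stated objective: alternative
-- what changed: Replaces A's single flag-driven scan (garbage/canceled_next booleans updated on every char) with a two-level index parser: an outer while skipping to '<' and an inner while counting garbage until '>', handling '!' by a look-ahead skip (i += 2) instead of a flag.
import Mathlib
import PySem

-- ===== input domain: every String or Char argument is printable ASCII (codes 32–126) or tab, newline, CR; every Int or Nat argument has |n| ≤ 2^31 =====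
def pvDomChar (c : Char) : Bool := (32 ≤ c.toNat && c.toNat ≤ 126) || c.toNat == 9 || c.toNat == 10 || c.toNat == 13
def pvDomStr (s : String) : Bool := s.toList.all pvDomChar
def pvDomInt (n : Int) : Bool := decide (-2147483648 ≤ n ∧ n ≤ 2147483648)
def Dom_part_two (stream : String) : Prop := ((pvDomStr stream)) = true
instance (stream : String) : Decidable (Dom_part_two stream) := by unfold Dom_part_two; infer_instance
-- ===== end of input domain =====

-- B replaces A's single flag-driven scan by a two-level index parser (outer skip loop /
-- inner garbage loop with '!' look-ahead skip), removing both boolean flags; objective: alternative.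

-- ===== PORT A =====
-- state (amount_garbage, garbage, canceled_next), branches in A's order
def pvStepA (st : Int × Bool × Bool) (c : Char) : Int × Bool × Bool :=
  match st with
  | (n, g, cn) =>
    if c = '<' ∧ g = false then (n, true, cn)
    else if c = '>' ∧ g = true ∧ cn = false then (n, false, cn)
    else if c = '!' ∧ g = true ∧ cn = false then (n, g, true)
    else if cn = true then (n, g, false)
    else if g = true then (n + 1, g, cn)
    else (n, g, cn)

def part_two (stream : String) : Int :=
  (stream.toList.foldl pvStepA (0, false, false)).1

-- ===== PORT B =====
-- Source B's outer while (advance past non-'<') and inner while (count until '>',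
-- '!' skips the next char via i += 2), as mutual recursion over the remaining chars.
mutual
  def pvOuterB : List Char → Int → Int
    | [], n => n
    | c :: rest, n => if c = '<' then pvInnerB rest n else pvOuterB rest n
  def pvInnerB : List Char → Int → Int
    | [], n => n
    | c :: rest, n =>
      if c = '>' then pvOuterB rest n
      else if c = '!' then
        -- Source B's i += 2: skip the canceled char (one extra structural step past '!')
        match rest with
        | [] => n
        | _ :: r => pvInnerB r n
      else pvInnerB rest (n + 1)
end

def part_two_alt (stream : String) : Int := pvOuterB stream.toList 0

-- ===== PRECONDITION & SPEC =====
def Spec_part_two (stream : String) (out : Int) : Prop := out = part_two_alt stream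
instance (stream : String) (out : Int) : Decidable (Spec_part_two stream out) := by unfold Spec_part_two; infer_instance

-- ===== CLAIM (what is proved, stated in full; the proofs are below) =====
def Claim_equal_part_two : Prop := ∀ (stream : String), Dom_part_two stream → Spec_part_two stream (part_two stream)

-- ===== LEMMAS AND PROOFS =====

-- Equation helpers for the mutual B parser (list-cons steps of Source B's two whiles)
theorem pvOuterB_nil (n : Int) : pvOuterB [] n = n := by rw [pvOuterB.eq_def]
theorem pvOuterB_lt (rest : List Char) (n : Int) : pvOuterB ('<' :: rest) n = pvInnerB rest n := by
  rw [pvOuterB.eq_def]; simp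
theorem pvOuterB_other (c : Char) (rest : List Char) (n : Int) (h : ¬ c = '<') :
    pvOuterB (c :: rest) n = pvOuterB rest n := by rw [pvOuterB.eq_def]; simp [h]
theorem pvInnerB_nil (n : Int) : pvInnerB [] n = n := by rw [pvInnerB.eq_def]
theorem pvInnerB_gt (rest : List Char) (n : Int) : pvInnerB ('>' :: rest) n = pvOuterB rest n := by
  rw [pvInnerB.eq_def]; simp
theorem pvInnerB_bang_nil (n : Int) : pvInnerB ['!'] n = n := by rw [pvInnerB.eq_def]; simp
theorem pvInnerB_bang_cons (x : Char) (r : List Char) (n : Int) :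
    pvInnerB ('!' :: x :: r) n = pvInnerB r n := by rw [pvInnerB.eq_def]; simp
theorem pvInnerB_other (c : Char) (rest : List Char) (n : Int) (h1 : ¬ c = '>') (h2 : ¬ c = '!') :
    pvInnerB (c :: rest) n = pvInnerB rest (n + 1) := by rw [pvInnerB.eq_def]; simp [h1, h2]

-- Joint invariant, by strong induction on the remaining length: A's fold from the
-- non-garbage state equals B's outer loop, and from the garbage/uncanceled state B's inner loop.
theorem pv_fold_eq (k : Nat) :
    ∀ l : List Char, l.length ≤ k → ∀ n : Int,
      ((l.foldl pvStepA (n, false, false)).1 = pvOuterB l n ∧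
       (l.foldl pvStepA (n, true, false)).1 = pvInnerB l n) := by
  induction k with
  | zero =>
    intro l hl n
    have : l = [] := List.eq_nil_of_length_eq_zero (Nat.le_zero.mp hl)
    subst this
    exact ⟨by rw [pvOuterB_nil]; rfl, by rw [pvInnerB_nil]; rfl⟩
  | succ k ih =>
    intro l hl n
    match l with
    | [] => exact ⟨by rw [pvOuterB_nil]; rfl, by rw [pvInnerB_nil]; rfl⟩
    | c :: rest =>
      have hr : rest.length ≤ k := by simpa using Nat.succ_le_succ_iff.mp hl
      constructor
      · -- outer loop step
        by_cases hc : c = '<'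
        · subst hc
          have hstep : pvStepA (n, false, false) '<' = (n, true, false) := by
            simp [pvStepA]
          rw [List.foldl_cons, hstep, pvOuterB_lt]
          exact (ih rest hr n).2
        · have hstep : pvStepA (n, false, false) c = (n, false, false) := by
            simp [pvStepA, hc]
          rw [List.foldl_cons, hstep, pvOuterB_other c rest n hc]
          exact (ih rest hr n).1
      · -- inner loop step
        by_cases hgt : c = '>'
        · subst hgt
          have hstep : pvStepA (n, true, false) '>' = (n, false, false) := by
            simp [pvStepA]
          rw [List.foldl_cons, hstep, pvInnerB_gt]
          exact (ih rest hr n).1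
        · by_cases hbang : c = '!'
          · subst hbang
            have hstep : pvStepA (n, true, false) '!' = (n, true, true) := by
              simp [pvStepA]
            rw [List.foldl_cons, hstep]
            match rest with
            | [] => rw [pvInnerB_bang_nil]; rfl
            | x :: r =>
              have hstep2 : pvStepA (n, true, true) x = (n, true, false) := by
                simp [pvStepA]
              have hr2 : r.length ≤ k := by
                simp at hr; omega
              rw [List.foldl_cons, hstep2, pvInnerB_bang_cons]
              exact (ih r hr2 n).2
          · have hstep : pvStepA (n, true, false) c = (n + 1, true, false) := by
              simp [pvStepA, hgt, hbang]
            rw [List.foldl_cons, hstep, pvInnerB_other c rest n hgt hbang]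
            exact (ih rest hr (n + 1)).2

-- ===== VERDICT (by name: the statement is the Claim_ definition above) =====
theorem part_two_spec : Claim_equal_part_two := by
  intro stream _
  unfold Spec_part_two part_two part_two_alt
  exact (pv_fold_eq stream.toList.length stream.toList le_rfl 0).1
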